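-- pv_equiv track=rewrite | github.com/lukpueh/try-repyV2 | upper_dot_lower.py | decode_dot_lower
-- ===== SOURCE A (Python) =====
-- def decode_dot_lower(string_enc):
--   """
--   <Purpose>
--     Decodes a passed dot-lower encoded string by replacing all
--     all dots (.) and the succeeding lower case letter with the upper case
--     representation of that letter.
--     The first letter is ignored, because it should be an underscore (_).
--
--
--   <Arguments>
--     sting_enc
--       A string to dot-lower decode
--
--   <Returns>
--     The dot lower decoded version of the passed string
--
--   """
--   string_dec = ""
--   length = len(string_enc)
--
--   # Start at 1 to ignore the leading underscore
--   i = 1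
--   while i < length:
--     if (string_enc[i] == "." and i + 1 < length and
--         string_enc[i + 1].isalpha()):
--       string_dec += string_enc[i + 1].upper()
--       i += 2
--
--     else:
--       string_dec += string_enc[i]
--       i += 1
--
--   return string_dec
-- ===== SOURCE B (Python) =====
-- import re
--
--
-- def decode_dot_lower(string_enc):
--   # Regex substitution: each dot followed by a non-dot character is replaced
--   # in one pass; alphabetic successors are uppercased, others kept verbatim.
--   # The leading character is ignored via the [1:] slice.
--   def repl(m):
--     c = m.group(1)
--     return c.upper() if c.isalpha() else m.group(0)
--
--   return re.sub(r'\.([^.])', repl, string_enc[1:])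
-- ===== Notes on version B (the rewrite author's own statement) =====
-- stated objective: idiomatic
-- what changed: Replaced the index-based while loop with explicit i+=1/i+=2 stepping and quadratic string_dec += concatenation by a single re.sub over string_enc[1:] with a callback that uppercases an alphabetic character after a dot and leaves other dot-successor pairs verbatim.
import Mathlib
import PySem

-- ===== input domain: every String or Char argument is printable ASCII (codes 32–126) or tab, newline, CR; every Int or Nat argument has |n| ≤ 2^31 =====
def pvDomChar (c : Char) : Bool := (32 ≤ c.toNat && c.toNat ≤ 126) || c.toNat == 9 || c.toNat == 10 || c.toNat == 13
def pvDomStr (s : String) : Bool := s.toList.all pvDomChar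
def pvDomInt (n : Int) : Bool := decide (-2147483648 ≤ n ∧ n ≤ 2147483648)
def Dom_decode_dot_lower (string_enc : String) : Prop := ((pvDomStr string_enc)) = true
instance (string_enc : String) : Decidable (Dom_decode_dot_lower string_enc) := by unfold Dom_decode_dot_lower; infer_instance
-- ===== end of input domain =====

-- B replaces A's index-stepping while loop by a single regex substitution
-- (re.sub with a callback) over string_enc[1:]; same return value, no speed claim.

-- ===== PORT A =====
-- A's while loop: i walks the string from index 1; the bounds-checked reads
-- string_enc[i] / string_enc[i+1] become getD (the guards ensure i < length).
def pvLoopA (s : List Char) (i : Nat) (acc : List Char) : List Char :=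
  if i < s.length then
    if s.getD i ' ' = '.' ∧ i + 1 < s.length ∧ PySem.Chars.isalpha (s.getD (i+1) ' ') then
      pvLoopA s (i + 2) (acc ++ [PySem.Chars.upperChar (s.getD (i+1) ' ')])
    else
      pvLoopA s (i + 1) (acc ++ [s.getD i ' '])
  else acc
termination_by s.length - i

def decode_dot_lower (string_enc : String) : String :=
  String.ofList (pvLoopA string_enc.toList 1 [])

-- ===== PORT B =====
-- transliteration of re.sub(r'\.([^.])', repl, string_enc[1:]): the regex
-- engine's left-to-right scan over the characters; a match consumes the dot
-- and its non-dot successor and emits repl's value, otherwise one character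
-- is copied and the scan resumes right after it.
def pvSubB : List Char → List Char
  | [] => []
  | [c] => [c]
  | c :: d :: rest =>
    if c = '.' ∧ d ≠ '.' then
      (if PySem.Chars.isalpha d then [PySem.Chars.upperChar d] else ['.', d]) ++ pvSubB rest
    else c :: pvSubB (d :: rest)

def decode_dot_lower_alt (string_enc : String) : String :=
  String.ofList (pvSubB (string_enc.toList.drop 1))

-- ===== PRECONDITION & SPEC =====
def Spec_decode_dot_lower (string_enc : String) (out : String) : Prop := out = decode_dot_lower_alt string_enc
instance (string_enc : String) (out : String) : Decidable (Spec_decode_dot_lower string_enc out) := by unfold Spec_decode_dot_lower; infer_instance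

-- ===== CLAIM (what is proved, stated in full; the proofs are below) =====
def Claim_equal_decode_dot_lower : Prop := ∀ (string_enc : String), Dom_decode_dot_lower string_enc → Spec_decode_dot_lower string_enc (decode_dot_lower string_enc)

-- ===== LEMMAS AND PROOFS =====

-- a non-dot head is always copied verbatim by the regex scan
theorem pvSubB_cons_of_ne_dot (c : Char) (t : List Char) (h : c ≠ '.') :
    pvSubB (c :: t) = c :: pvSubB t := by
  cases t with
  | nil => simp [pvSubB]
  | cons d r => simp [pvSubB, h]

theorem pvLoopA_eq (s : List Char) (i : Nat) (acc : List Char) :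
    pvLoopA s i acc = acc ++ pvSubB (s.drop i) := by
  induction i, acc using pvLoopA.induct s with
  | case1 i acc hlt hcond ih =>
    -- A's replacement branch: a dot with an alphabetic successor
    obtain ⟨hdot, hlt2, halpha⟩ := hcond
    have hd1 : s.drop i = s.getD i ' ' :: s.drop (i + 1) := by
      rw [List.getD_eq_getElem _ _ hlt]; exact (List.getElem_cons_drop hlt).symm
    have hd2 : s.drop (i + 1) = s.getD (i+1) ' ' :: s.drop (i + 2) := by
      rw [List.getD_eq_getElem _ _ hlt2]; exact (List.getElem_cons_drop hlt2).symm
    have hne : s.getD (i+1) ' ' ≠ '.' := by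
      intro h; rw [h] at halpha; exact absurd halpha (by decide)
    rw [pvLoopA, if_pos hlt, if_pos ⟨hdot, hlt2, halpha⟩, ih, hd1, hd2, hdot]
    simp only [pvSubB]
    rw [if_pos (⟨trivial, hne⟩ : True ∧ _), if_pos halpha]
    simp
  | case2 i acc hlt hcond ih =>
    -- A's copy branch
    have hd1 : s.drop i = s.getD i ' ' :: s.drop (i + 1) := by
      rw [List.getD_eq_getElem _ _ hlt]; exact (List.getElem_cons_drop hlt).symm
    rw [pvLoopA, if_pos hlt, if_neg hcond, ih, hd1]
    by_cases hdot : s.getD i ' ' = '.'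
    · by_cases hlt2 : i + 1 < s.length
      · have hd2 : s.drop (i + 1) = s.getD (i+1) ' ' :: s.drop (i + 2) := by
          rw [List.getD_eq_getElem _ _ hlt2]; exact (List.getElem_cons_drop hlt2).symm
        by_cases hdd : s.getD (i+1) ' ' = '.'
        · -- successor is a dot: the regex does not match here either
          rw [hd2]
          simp only [pvSubB]
          simp only [List.getD_eq_getElem?_getD] at *
          rw [if_neg (fun h => h.2 hdd), ← hd2]
          simp
        · -- successor non-dot, hence non-alpha (A's condition failed)
          have hna : PySem.Chars.isalpha (s.getD (i+1) ' ') = false := by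
            by_contra h
            exact hcond ⟨hdot, hlt2, by simpa using h⟩
          rw [hd2]
          simp only [pvSubB]
          simp only [List.getD_eq_getElem?_getD] at *
          rw [if_pos ⟨hdot, hdd⟩, if_neg (by simp [hna]),
            pvSubB_cons_of_ne_dot _ _ hdd]
          simp [hdot]
      · -- i is the last index
        have hnil : s.drop (i+1) = [] := List.drop_eq_nil_of_le (by omega)
        rw [hnil]
        simp [pvSubB]
    · -- head is not a dot: plain copy on both sides
      rw [pvSubB_cons_of_ne_dot _ _ hdot]
      simp
  | case3 i acc hge =>
    rw [pvLoopA, if_neg hge]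
    have hnil : s.drop i = [] := List.drop_eq_nil_of_le (by omega)
    simp [hnil, pvSubB]

-- ===== VERDICT (by name: the statement is the Claim_ definition above) =====
theorem decode_dot_lower_spec : Claim_equal_decode_dot_lower := by
  intro s _
  unfold Spec_decode_dot_lower decode_dot_lower decode_dot_lower_alt
  rw [pvLoopA_eq]
  simp
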